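-- pv_equiv track=rewrite | github.com/mathisweil/evo-memory | utils/core.py | get_first_subseq_split
-- ===== SOURCE A (Python) =====
-- def get_first_subseq_split(seq, subseq):
--     n = len(seq)
--     m = len(subseq)
--     for i in range(n - m + 1):
--         found = True
--         for j in range(m):
--             if seq[i + j] != subseq[j]:
--                 found = False
--                 break
--         if found:
--             return seq[:i]
--     return seq
-- ===== SOURCE B (Python) =====
-- def get_first_subseq_split(seq, subseq):
--     m = len(subseq)
--     prefix = []
--     rest = seq
--     while len(rest) >= m:
--         if rest[:m] == subseq:
--             return prefix
--         prefix.append(rest[0])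
--         rest = rest[1:]
--     return seq
-- ===== Notes on version B (the rewrite author's own statement) =====
-- stated objective: alternative
-- what changed: Replaces A's index-based nested loops (outer position index, inner element-by-element comparison with a found/break flag) by a structural recursion that peels elements off the front while comparing the leading window slice against subseq, accumulating the prefix.
import Mathlib
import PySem

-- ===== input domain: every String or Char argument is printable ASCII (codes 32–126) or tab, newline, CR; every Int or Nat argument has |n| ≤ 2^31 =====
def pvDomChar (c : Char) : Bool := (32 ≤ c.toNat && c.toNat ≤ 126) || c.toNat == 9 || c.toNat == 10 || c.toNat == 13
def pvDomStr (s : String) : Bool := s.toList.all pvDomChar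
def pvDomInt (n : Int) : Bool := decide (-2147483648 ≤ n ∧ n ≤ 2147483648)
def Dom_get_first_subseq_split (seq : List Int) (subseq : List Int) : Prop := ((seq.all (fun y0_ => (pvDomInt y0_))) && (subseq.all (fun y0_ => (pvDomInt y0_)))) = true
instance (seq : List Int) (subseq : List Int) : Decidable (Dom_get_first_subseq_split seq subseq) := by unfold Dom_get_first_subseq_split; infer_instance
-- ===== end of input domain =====

-- B replaces A's index-based double loop by a structural recursion that peels the head
-- while comparing the window slice to subseq (objective: alternative decomposition, same cost).

-- ===== PORT A =====
-- inner 'for j in range(m)' with the found/break flag: returns false at the first mismatch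
-- (the caller only runs it with 0 ≤ i < n-m+1, so the indices i+j and j are always in range
-- and pyGetD is exact there)
def pvInnerA (seq subseq : List Int) (i : Int) (j m : Nat) : Bool :=
  if j < m then
    if PySem.List.pyGetD seq (i + (j : Int)) 0 ≠ PySem.List.pyGetD subseq (j : Int) 0 then false
    else pvInnerA seq subseq i (j + 1) m
  else true
termination_by m - j

-- outer 'for i in range(n - m + 1)' with the early 'return seq[:i]'
def pvOuterA (seq subseq : List Int) (bound i : Int) : List Int :=
  if _h : i < bound then
    if pvInnerA seq subseq i 0 subseq.length then PySem.List.slice seq none (some i)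
    else pvOuterA seq subseq bound (i + 1)
  else seq
termination_by (bound - i).toNat
decreasing_by omega

def get_first_subseq_split (seq : List Int) (subseq : List Int) : List Int :=
  pvOuterA seq subseq ((seq.length : Int) - (subseq.length : Int) + 1) 0

-- ===== PORT B =====
-- 'while len(rest) >= m: if rest[:m] == subseq: return prefix; prefix.append(rest[0]); rest = rest[1:]'
def pvAltGo (seq subseq pre rest : List Int) : List Int :=
  if rest.length < subseq.length then seq
  else if rest.take subseq.length = subseq then pre
  else
    match rest with
    | [] => seq                       -- unreachable: rest = [] here forces subseq = [], which matched above
    | x :: xs => pvAltGo seq subseq (pre ++ [x]) xs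
termination_by rest.length

def get_first_subseq_split_alt (seq : List Int) (subseq : List Int) : List Int :=
  pvAltGo seq subseq [] seq

-- ===== PRECONDITION & SPEC =====
def Spec_get_first_subseq_split (seq : List Int) (subseq : List Int) (out : List Int) : Prop := out = get_first_subseq_split_alt seq subseq
instance (seq : List Int) (subseq : List Int) (out : List Int) : Decidable (Spec_get_first_subseq_split seq subseq out) := by unfold Spec_get_first_subseq_split; infer_instance

-- ===== CLAIM (what is proved, stated in full; the proofs are below) =====
def Claim_equal_get_first_subseq_split : Prop := ∀ (seq : List Int) (subseq : List Int), Dom_get_first_subseq_split seq subseq → Spec_get_first_subseq_split seq subseq (get_first_subseq_split seq subseq)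

-- ===== LEMMAS AND PROOFS =====

-- A's inner loop decides "the window of seq at k matches subseq from position j on"
lemma pvInnerA_char (seq subseq : List Int) :
    ∀ d (k j : Nat), d = subseq.length - j → j ≤ subseq.length → k + subseq.length ≤ seq.length →
    pvInnerA seq subseq (k : Int) j subseq.length
      = decide (List.take (subseq.length - j) (List.drop (k + j) seq) = List.drop j subseq) := by
  intro d
  induction d with
  | zero =>
    intro k j hd hj hk
    have hjm : j = subseq.length := by omega
    rw [pvInnerA]
    simp [hjm]
  | succ d ih =>
    intro k j hd hj hk
    have hjm : j < subseq.length := by omega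
    have hkj : k + j < seq.length := by omega
    rw [pvInnerA]
    have h1 : PySem.List.pyGetD seq ((k : Int) + (j : Int)) 0 = seq[k + j] := by
      have : ((k : Int) + (j : Int)) = ((k + j : Nat) : Int) := by push_cast; ring
      rw [this, PySem.List.pyGetD_natCast, List.getD_eq_getElem seq 0 hkj]
    have h2 : PySem.List.pyGetD subseq ((j : Nat) : Int) 0 = subseq[j] := by
      rw [PySem.List.pyGetD_natCast, List.getD_eq_getElem subseq 0 hjm]
    have hdrop : List.drop (k + j) seq = seq[k + j] :: List.drop (k + j + 1) seq :=
      List.drop_eq_getElem_cons hkj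
    have hdrops : List.drop j subseq = subseq[j] :: List.drop (j + 1) subseq :=
      List.drop_eq_getElem_cons hjm
    have hm : subseq.length - j = (subseq.length - (j + 1)) + 1 := by omega
    rw [if_pos hjm, h1, h2, hdrop, hdrops, hm, List.take_succ_cons]
    by_cases heq : seq[k + j] = subseq[j]
    · rw [if_neg (by simp [heq])]
      rw [ih k (j + 1) (by omega) (by omega) hk]
      have hkj1 : k + (j + 1) = k + j + 1 := by omega
      rw [hkj1, decide_eq_decide]
      simp only [List.cons.injEq, heq, true_and]
    · rw [if_pos (by simpa using heq)]
      symm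
      rw [decide_eq_false_iff_not]
      simp only [List.cons.injEq]
      exact fun h => heq h.1

lemma pv_main (seq subseq : List Int) :
    ∀ d k, d = seq.length - k → k ≤ seq.length →
    pvOuterA seq subseq ((seq.length : Int) - (subseq.length : Int) + 1) (k : Int)
      = pvAltGo seq subseq (seq.take k) (seq.drop k) := by
  intro d
  induction d with
  | zero =>
    intro k hd hk
    have hkn : k = seq.length := by omega
    rw [pvOuterA, pvAltGo.eq_def]
    by_cases hm : subseq.length = 0
    · -- m = 0: both sides match immediately at position k = n
      have hcond : ((k : Int) < (seq.length : Int) - (subseq.length : Int) + 1) := by omega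
      rw [dif_pos hcond]
      have hsub : subseq = [] := List.eq_nil_of_length_eq_zero hm
      have hin : pvInnerA seq subseq (k : Int) 0 subseq.length = true := by
        rw [pvInnerA_char seq subseq 0 k 0 (by omega) (by omega) (by omega)]
        simp [hsub]
      rw [if_pos hin, PySem.List.slice_to_natCast]
      simp [hsub, hkn]
    · have hcond : ¬ ((k : Int) < (seq.length : Int) - (subseq.length : Int) + 1) := by omega
      rw [dif_neg hcond]
      rw [if_pos (by simp [hkn]; omega)]
  | succ d ih =>
    intro k hd hk
    have hkn : k < seq.length := by omega
    rw [pvOuterA, pvAltGo.eq_def]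
    by_cases hwin : k + subseq.length ≤ seq.length
    · -- window fits: both sides test the same match condition
      have hcond : ((k : Int) < (seq.length : Int) - (subseq.length : Int) + 1) := by omega
      rw [dif_pos hcond]
      have hlen : ¬ ((seq.drop k).length < subseq.length) := by
        simp [List.length_drop]; omega
      rw [if_neg hlen]
      have hin : pvInnerA seq subseq (k : Int) 0 subseq.length
          = decide (List.take subseq.length (List.drop k seq) = subseq) := by
        rw [pvInnerA_char seq subseq (subseq.length) k 0 (by omega) (by omega) hwin]
        simp
      by_cases hmatch : List.take subseq.length (List.drop k seq) = subseq
      · rw [if_pos (by rw [hin]; simpa using hmatch), if_pos hmatch,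
            PySem.List.slice_to_natCast]
      · rw [if_neg (by rw [hin]; simpa using hmatch), if_neg hmatch]
        have hdrop : List.drop k seq = seq[k] :: List.drop (k + 1) seq :=
          List.drop_eq_getElem_cons hkn
        rw [hdrop]
        have htake : seq.take k ++ [seq[k]] = seq.take (k + 1) := by
          rw [List.take_add_one, List.getElem?_eq_getElem hkn]; rfl
        have hred : (match seq[k] :: List.drop (k + 1) seq with
            | [] => seq
            | x :: xs => pvAltGo seq subseq (List.take k seq ++ [x]) xs)
            = pvAltGo seq subseq (List.take k seq ++ [seq[k]]) (List.drop (k + 1) seq) := rfl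
        have hcast : (k : Int) + 1 = ((k + 1 : Nat) : Int) := by push_cast; ring
        rw [hred, htake, hcast, ih (k + 1) (by omega) (by omega)]
    · -- window does not fit: both return seq
      have hcond : ¬ ((k : Int) < (seq.length : Int) - (subseq.length : Int) + 1) := by omega
      rw [dif_neg hcond]
      rw [if_pos (by simp [List.length_drop]; omega)]

-- ===== VERDICT (by name: the statement is the Claim_ definition above) =====
theorem get_first_subseq_split_spec : Claim_equal_get_first_subseq_split := by
  intro seq subseq _
  unfold Spec_get_first_subseq_split get_first_subseq_split get_first_subseq_split_alt
  have := pv_main seq subseq seq.length 0 (by omega) (by omega)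
  simpa using this
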